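-- pv_equiv track=rewrite | github.com/connectagent/user-files-tunnel | src/uftunnel.py | _policy_diff
-- ===== SOURCE A (Python) =====
-- _ACCESS_TYPES = ("deny", "read", "read_execute", "write", "write_execute", "copy_on_write")
--
-- def _policy_diff(old: dict, new: dict) -> list[str]:
--     """Return human-readable lines describing what changed between two policy dicts."""
--     old_map: dict[str, str] = {}
--     for atype in _ACCESS_TYPES:
--         for p in old.get(atype) or []:
--             old_map[str(p)] = atype
--     new_map: dict[str, str] = {}
--     for atype in _ACCESS_TYPES:
--         for p in new.get(atype) or []:
--             new_map[str(p)] = atype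
--
--     lines = []
--     for path in sorted(set(old_map) | set(new_map)):
--         old_a = old_map.get(path)
--         new_a = new_map.get(path)
--         if old_a is None:
--             lines.append(f"  + {path}  ({new_a})")
--         elif new_a is None:
--             lines.append(f"  - {path}  ({old_a})")
--         elif old_a != new_a:
--             lines.append(f"  ~ {path}  ({old_a} -> {new_a})")
--     return lines
-- ===== SOURCE B (Python) =====
-- _ACCESS_TYPES = ("deny", "read", "read_execute", "write", "write_execute", "copy_on_write")
--
-- def _build_map(d):
--     m = {}
--     for atype in _ACCESS_TYPES:
--         for p in d.get(atype) or []: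
--             m[str(p)] = atype
--     return m
--
-- def _policy_diff(old: dict, new: dict) -> list[str]:
--     old_map = _build_map(old)
--     new_map = _build_map(new)
--     entries = [(p, f"  + {p}  ({a})") for p, a in new_map.items() if p not in old_map]
--     entries += [(p, f"  - {p}  ({a})") for p, a in old_map.items() if p not in new_map]
--     entries += [(p, f"  ~ {p}  ({a} -> {new_map[p]})") for p, a in old_map.items()
--                 if p in new_map and a != new_map[p]]
--     entries.sort(key=lambda e: e[0])
--     return [line for _, line in entries]
-- ===== Notes on version B (the rewrite author's own statement) =====
-- stated objective: alternative
-- what changed: Replaces A's single branchy scan over the sorted key union by three comprehensions (added from new_map, removed and changed from old_map) collected as (path, line) pairs and sorted once at the end; unchanged keys never enter the sort.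
import Mathlib
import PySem

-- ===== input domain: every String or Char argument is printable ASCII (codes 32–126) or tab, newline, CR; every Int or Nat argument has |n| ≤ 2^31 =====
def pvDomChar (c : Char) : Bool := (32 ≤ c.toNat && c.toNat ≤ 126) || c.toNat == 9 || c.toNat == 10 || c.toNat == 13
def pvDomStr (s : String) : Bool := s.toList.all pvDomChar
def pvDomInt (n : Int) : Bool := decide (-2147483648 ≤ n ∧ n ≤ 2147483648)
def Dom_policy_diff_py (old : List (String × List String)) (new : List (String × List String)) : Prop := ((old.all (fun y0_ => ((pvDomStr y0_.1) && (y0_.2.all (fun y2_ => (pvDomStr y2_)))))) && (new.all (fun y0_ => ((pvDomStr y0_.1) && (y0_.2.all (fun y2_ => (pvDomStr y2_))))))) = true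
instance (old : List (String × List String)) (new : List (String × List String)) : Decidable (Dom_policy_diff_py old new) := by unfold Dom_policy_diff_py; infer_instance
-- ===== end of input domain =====

-- B diffs the two policy maps by three comprehensions (added / removed / changed) merged into one
-- (path, line) list sorted once at the end, instead of A's branchy loop over the sorted key union
-- (objective: alternative decomposition, same asymptotic cost).

-- ===== PORT A =====

-- _ACCESS_TYPES
def pvAccessTypes : List String :=
  ["deny", "read", "read_execute", "write", "write_execute", "copy_on_write"]

-- 'd.get(atype) or []' on the input dict (assoc list, first match; None/[] both become [])
def pvGet (d : List (String × List String)) (k : String) : List String :=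
  (PySem.Dict.mk d).getD k []

-- the two identical map-building loops of _policy_diff ('for atype in _ACCESS_TYPES: for p in …: m[str(p)] = atype')
def pvBuildMap (d : List (String × List String)) : PySem.Dict String String :=
  pvAccessTypes.foldl
    (fun m atype => (pvGet d atype).foldl (fun m p => m.insert p atype) m)
    PySem.Dict.empty

-- f-string rendering of an Optional[str] (str(None) = "None"; unreachable in practice but literal)
def pvOptStr (o : Option String) : String := o.getD "None"

def policy_diff_py (old : List (String × List String)) (new : List (String × List String)) : List String :=
  let oldMap := pvBuildMap old
  let newMap := pvBuildMap new
  let paths := PySem.List.sorted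
    (PySem.Set.union (PySem.Set.ofList oldMap.keys) (PySem.Set.ofList newMap.keys)) (fun x => x)
  paths.foldl (fun lines path =>
    let oldA := oldMap.get? path
    let newA := newMap.get? path
    if oldA = none then lines ++ ["  + " ++ path ++ "  (" ++ pvOptStr newA ++ ")"]
    else if newA = none then lines ++ ["  - " ++ path ++ "  (" ++ pvOptStr oldA ++ ")"]
    else if oldA ≠ newA then
      lines ++ ["  ~ " ++ path ++ "  (" ++ pvOptStr oldA ++ " -> " ++ pvOptStr newA ++ ")"]
    else lines) []

-- ===== PORT B =====

def policy_diff_py_alt (old : List (String × List String)) (new : List (String × List String)) : List String :=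
  let oldMap := pvBuildMap old
  let newMap := pvBuildMap new
  let entries :=
    ((newMap.items.filter (fun pa => !oldMap.contains pa.1)).map
        (fun pa => (pa.1, "  + " ++ pa.1 ++ "  (" ++ pa.2 ++ ")")))
    ++ ((oldMap.items.filter (fun pa => !newMap.contains pa.1)).map
        (fun pa => (pa.1, "  - " ++ pa.1 ++ "  (" ++ pa.2 ++ ")")))
    ++ ((oldMap.items.filter (fun pa => newMap.contains pa.1 && pa.2 != newMap.getD pa.1 "")).map
        (fun pa => (pa.1, "  ~ " ++ pa.1 ++ "  (" ++ pa.2 ++ " -> " ++ newMap.getD pa.1 "" ++ ")")))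
  (PySem.List.sorted entries (fun e => e.1)).map (fun e => e.2)

-- ===== PRECONDITION & SPEC =====
def Spec_policy_diff_py (old : List (String × List String)) (new : List (String × List String)) (out : List String) : Prop := out = policy_diff_py_alt old new
instance (old : List (String × List String)) (new : List (String × List String)) (out : List String) : Decidable (Spec_policy_diff_py old new out) := by unfold Spec_policy_diff_py; infer_instance

-- ===== CLAIM (what is proved, stated in full; the proofs are below) =====
def Claim_equal_policy_diff_py : Prop := ∀ (old : List (String × List String)) (new : List (String × List String)), Dom_policy_diff_py old new → Spec_policy_diff_py old new (policy_diff_py old new)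

-- ===== LEMMAS AND PROOFS =====

-- the optional line A emits for a path, as a function of the two maps
def pvOpt (om nm : PySem.Dict String String) (p : String) : Option String :=
  if om.get? p = none then some ("  + " ++ p ++ "  (" ++ pvOptStr (nm.get? p) ++ ")")
  else if nm.get? p = none then some ("  - " ++ p ++ "  (" ++ pvOptStr (om.get? p) ++ ")")
  else if om.get? p ≠ nm.get? p then
    some ("  ~ " ++ p ++ "  (" ++ pvOptStr (om.get? p) ++ " -> " ++ pvOptStr (nm.get? p) ++ ")")
  else none

def pvOptPair (om nm : PySem.Dict String String) (p : String) : Option (String × String) :=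
  (pvOpt om nm p).map (fun l => (p, l))

-- B's entry list, named for the proofs
def pvEnts (om nm : PySem.Dict String String) : List (String × String) :=
    ((nm.items.filter (fun pa => !om.contains pa.1)).map
        (fun pa => (pa.1, "  + " ++ pa.1 ++ "  (" ++ pa.2 ++ ")")))
    ++ ((om.items.filter (fun pa => !nm.contains pa.1)).map
        (fun pa => (pa.1, "  - " ++ pa.1 ++ "  (" ++ pa.2 ++ ")")))
    ++ ((om.items.filter (fun pa => nm.contains pa.1 && pa.2 != nm.getD pa.1 "")).map
        (fun pa => (pa.1, "  ~ " ++ pa.1 ++ "  (" ++ pa.2 ++ " -> " ++ nm.getD pa.1 "" ++ ")")))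

def pvU (om nm : PySem.Dict String String) : List String :=
  PySem.Set.union (PySem.Set.ofList om.keys) (PySem.Set.ofList nm.keys)

-- A's loop is a filterMap over the sorted union
theorem pvFoldA (om nm : PySem.Dict String String) (l : List String) (acc : List String) :
    l.foldl (fun lines path =>
      let oldA := om.get? path
      let newA := nm.get? path
      if oldA = none then lines ++ ["  + " ++ path ++ "  (" ++ pvOptStr newA ++ ")"]
      else if newA = none then lines ++ ["  - " ++ path ++ "  (" ++ pvOptStr oldA ++ ")"]
      else if oldA ≠ newA then
        lines ++ ["  ~ " ++ path ++ "  (" ++ pvOptStr oldA ++ " -> " ++ pvOptStr newA ++ ")"]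
      else lines) acc
    = acc ++ l.filterMap (pvOpt om nm) := by
  induction l generalizing acc with
  | nil => simp
  | cons x xs ih =>
    simp only [List.foldl_cons, List.filterMap_cons, ih, pvOpt]
    split_ifs <;> simp

theorem pvNodupBuildAux (g : String → List String) (ats : List String)
    (m : PySem.Dict String String) (h : m.keys.Nodup) :
    (ats.foldl (fun m atype => (g atype).foldl (fun m p => m.insert p atype) m) m).keys.Nodup := by
  induction ats generalizing m with
  | nil => exact h
  | cons a ats ih =>
    exact ih _ (PySem.Dict.nodup_keys_foldl_insert (g a) (fun _ _ => a) m h)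

theorem pvNodupBuild (d : List (String × List String)) : (pvBuildMap d).keys.Nodup :=
  pvNodupBuildAux _ _ _ PySem.Dict.nodup_keys_empty

theorem pvNodupU (om nm : PySem.Dict String String) : (pvU om nm).Nodup :=
  PySem.Set.nodup_union _ _ (PySem.Set.nodup_ofList _)

theorem pvMemU (om nm : PySem.Dict String String) (x : String) :
    x ∈ pvU om nm ↔ (om.get? x ≠ none ∨ nm.get? x ≠ none) := by
  unfold pvU
  rw [PySem.Set.mem_union, PySem.Set.mem_ofList, PySem.Set.mem_ofList]
  constructor
  · rintro (h | h)
    · exact Or.inl (fun hc => (PySem.Dict.get?_eq_none_iff_not_mem_keys om x).mp hc h)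
    · exact Or.inr (fun hc => (PySem.Dict.get?_eq_none_iff_not_mem_keys nm x).mp hc h)
  · rintro (h | h)
    · by_contra hc
      exact h ((PySem.Dict.get?_eq_none_iff_not_mem_keys om x).mpr (fun hm => hc (Or.inl hm)))
    · by_contra hc
      exact h ((PySem.Dict.get?_eq_none_iff_not_mem_keys nm x).mpr (fun hm => hc (Or.inr hm)))

-- membership in B's entry list = "the path is a key somewhere and A would emit that line"
theorem pvMemEnts (om nm : PySem.Dict String String)
    (hno : om.keys.Nodup) (hnn : nm.keys.Nodup) (x : String) (l : String) :
    (x, l) ∈ pvEnts om nm ↔ (x ∈ pvU om nm ∧ pvOpt om nm x = some l) := by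
  rw [pvMemU]
  unfold pvEnts pvOpt
  simp only [List.mem_append, List.mem_map, List.mem_filter, Prod.mk.injEq,
    Bool.not_eq_eq_eq_not, Bool.not_true, Bool.and_eq_true, bne_iff_ne, ne_eq,
    PySem.Dict.contains_eq_isSome_get?, Option.isSome_eq_false_iff,
    Option.isSome_iff_ne_none]
  constructor
  · rintro ((⟨⟨p, v⟩, ⟨hmem, hnc⟩, hx, hl⟩ | ⟨⟨p, v⟩, ⟨hmem, hnc⟩, hx, hl⟩) | ⟨⟨p, v⟩, ⟨hmem, hsome, hne⟩, hx, hl⟩) <;> subst hx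
    · have hnc' : om.get? p = none := Option.isNone_iff_eq_none.mp hnc
      have hg : nm.get? p = some v :=
        (PySem.Dict.get?_eq_some_iff_mem_items nm p v hnn).mpr hmem
      refine ⟨Or.inr (by simp [hg]), ?_⟩
      rw [if_pos hnc', hg]
      simp [pvOptStr, ← hl]
    · have hnc' : nm.get? p = none := Option.isNone_iff_eq_none.mp hnc
      have hg : om.get? p = some v :=
        (PySem.Dict.get?_eq_some_iff_mem_items om p v hno).mpr hmem
      refine ⟨Or.inl (by simp [hg]), ?_⟩
      rw [if_neg (by simp [hg]), if_pos hnc', hg]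
      simp [pvOptStr, ← hl]
    · have hg : om.get? p = some v :=
        (PySem.Dict.get?_eq_some_iff_mem_items om p v hno).mpr hmem
      obtain ⟨b, hb⟩ := Option.ne_none_iff_exists'.mp hsome
      have hgd : nm.getD p "" = b := by
        rw [PySem.Dict.getD_eq_get?_getD, hb]; rfl
      rw [hgd] at hne hl
      refine ⟨Or.inl (by simp [hg]), ?_⟩
      rw [if_neg (by simp [hg]), if_neg (by simp [hb]),
        if_pos (by simp [hg, hb]; exact fun h => hne h), hg, hb]
      simp [pvOptStr, ← hl]
  · rintro ⟨hu, hopt⟩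
    by_cases ho : om.get? x = none
    · have hn : nm.get? x ≠ none := by
        rcases hu with h | h
        · exact absurd ho h
        · exact h
      obtain ⟨b, hb⟩ := Option.ne_none_iff_exists'.mp hn
      rw [if_pos ho, hb] at hopt
      refine Or.inl (Or.inl ⟨(x, b), ⟨?_, by simp [ho]⟩, rfl, ?_⟩)
      · exact (PySem.Dict.get?_eq_some_iff_mem_items nm x b hnn).mp hb
      · simpa [pvOptStr] using hopt
    · obtain ⟨a, ha⟩ := Option.ne_none_iff_exists'.mp ho
      have hmemo : (x, a) ∈ om.items := (PySem.Dict.get?_eq_some_iff_mem_items om x a hno).mp ha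
      by_cases hn : nm.get? x = none
      · rw [if_neg ho, if_pos hn, ha] at hopt
        refine Or.inl (Or.inr ⟨(x, a), ⟨hmemo, by simp [hn]⟩, rfl, ?_⟩)
        simpa [pvOptStr] using hopt
      · obtain ⟨b, hb⟩ := Option.ne_none_iff_exists'.mp hn
        rw [if_neg ho, if_neg hn] at hopt
        have hgd : nm.getD x "" = b := by
          rw [PySem.Dict.getD_eq_get?_getD, hb]; rfl
        by_cases hab : om.get? x = nm.get? x
        · rw [if_neg (by simp [hab])] at hopt
          exact absurd hopt (by simp)
        · rw [if_pos hab, ha, hb] at hopt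
          refine Or.inr ⟨(x, a), ⟨hmemo, hn, ?_⟩, rfl, ?_⟩
          · rw [hgd]
            intro h
            exact hab (by simp only [] at h; rw [ha, hb]; exact congrArg some h)
          · simpa [pvOptStr, hgd] using hopt

theorem pvNodupEnts (om nm : PySem.Dict String String)
    (hno : om.keys.Nodup) (hnn : nm.keys.Nodup) : (pvEnts om nm).Nodup := by
  apply List.Nodup.of_map (f := Prod.fst)
  unfold pvEnts
  simp only [List.map_append, List.map_map, Function.comp_def]
  rw [List.append_assoc]
  have hsub : ∀ (d : PySem.Dict String String) (q : String × String → Bool),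
      d.keys.Nodup → ((d.items.filter q).map (fun pa => pa.1)).Nodup := by
    intro d q hnd
    refine List.Sublist.nodup ?_ (by simpa only [PySem.Dict.keys] using hnd)
    exact (List.filter_sublist (l := d.items)).map _
  have hmo : ∀ (q : String × String → Bool) (x : String),
      x ∈ (om.items.filter q).map (fun pa => pa.1) → om.get? x ≠ none := by
    intro q x hx hc
    simp only [List.mem_map, List.mem_filter] at hx
    obtain ⟨pa, ⟨hmem, _⟩, hx⟩ := hx
    exact ((PySem.Dict.get?_eq_none_iff_not_mem_keys om x).mp hc)
      (hx ▸ PySem.Dict.mem_keys_of_mem_items om hmem)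
  refine List.Nodup.append (hsub nm _ hnn)
      (List.Nodup.append (hsub om _ hno) (hsub om _ hno) ?_) ?_
  · intro x hx2 hx3
    simp only [List.mem_map, List.mem_filter] at hx2 hx3
    obtain ⟨pa, ⟨_, hq⟩, hx⟩ := hx2
    obtain ⟨pb, ⟨_, hq'⟩, hx'⟩ := hx3
    rw [hx] at hq
    rw [hx'] at hq'
    simp only [Bool.not_eq_eq_eq_not, Bool.not_true, Bool.and_eq_true] at hq hq'
    rw [hq] at hq'
    exact absurd hq'.1 (by simp)
  · intro x hx1 hx23
    have h1 : om.get? x = none := by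
      simp only [List.mem_map, List.mem_filter] at hx1
      obtain ⟨pa, ⟨_, hq⟩, hx⟩ := hx1
      simp only [Bool.not_eq_eq_eq_not, Bool.not_true,
        PySem.Dict.contains_eq_isSome_get?, Option.isSome_eq_false_iff,
        Option.isNone_iff_eq_none] at hq
      rw [← hx]
      exact hq
    rcases List.mem_append.mp hx23 with h | h
    · exact hmo _ x h h1
    · exact hmo _ x h h1

theorem pvSortedULt (om nm : PySem.Dict String String) :
    ((PySem.List.sorted (pvU om nm) (fun x => x)).Pairwise (· < ·)) := by
  have hle := PySem.List.sorted_pairwise (pvU om nm) (fun x => x)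
  have hnd : (PySem.List.sorted (pvU om nm) (fun x => x)).Nodup :=
    ((PySem.List.sorted_perm (pvU om nm) (fun x => x) false).nodup_iff).mpr (pvNodupU om nm)
  exact (hle.and hnd).imp (fun h => lt_of_le_of_ne h.1 h.2)

-- B's sorted entry list is A's filterMap over the sorted union, paired with its key
theorem pvSortedEnts (om nm : PySem.Dict String String)
    (hno : om.keys.Nodup) (hnn : nm.keys.Nodup) :
    PySem.List.sorted (pvEnts om nm) (fun e => e.1)
      = (PySem.List.sorted (pvU om nm) (fun x => x)).filterMap (pvOptPair om nm) := by
  apply PySem.List.sorted_eq_of_perm_of_pairwise_lt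
  · -- permutation
    have h1 : ((PySem.List.sorted (pvU om nm) (fun x => x)).filterMap (pvOptPair om nm)).Perm
        ((pvU om nm).filterMap (pvOptPair om nm)) :=
      (PySem.List.sorted_perm (pvU om nm) (fun x => x) false).filterMap _
    refine h1.trans ?_
    rw [List.perm_ext_iff_of_nodup ?_ (pvNodupEnts om nm hno hnn)]
    · rintro ⟨x, l⟩
      rw [pvMemEnts om nm hno hnn x l]
      simp only [List.mem_filterMap, pvOptPair, Option.map_eq_some_iff]
      constructor
      · rintro ⟨p, hp, line, hline, heq⟩
        obtain ⟨hx, hl⟩ := Prod.mk.injEq .. ▸ heq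
        subst hx
        subst hl
        exact ⟨hp, hline⟩
      · rintro ⟨hx, hopt⟩
        exact ⟨x, hx, l, hopt, rfl⟩
    · -- nodup of the filterMap
      refine List.Nodup.filterMap ?_ (pvNodupU om nm)
      rintro a a' ⟨x, l⟩ ha ha'
      simp only [pvOptPair, Option.mem_def, Option.map_eq_some_iff] at ha ha'
      obtain ⟨_, _, h⟩ := ha
      obtain ⟨_, _, h'⟩ := ha'
      have hx : a = x := (Prod.mk.injEq .. ▸ h).1
      have hx' : a' = x := (Prod.mk.injEq .. ▸ h').1
      rw [hx, hx']
  · -- strictly increasing keys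
    rw [List.pairwise_filterMap]
    refine (pvSortedULt om nm).imp ?_
    intro a a' hlt b hb b' hb'
    simp only [pvOptPair, Option.map_eq_some_iff] at hb hb'
    obtain ⟨_, _, h⟩ := hb
    obtain ⟨_, _, h'⟩ := hb'
    rw [← h, ← h']
    exact hlt

theorem pvAltEq (old new : List (String × List String)) :
    policy_diff_py_alt old new
      = (PySem.List.sorted (pvEnts (pvBuildMap old) (pvBuildMap new)) (fun e => e.1)).map
          (fun e => e.2) := rfl

-- ===== VERDICT (by name: the statement is the Claim_ definition above) =====
theorem policy_diff_py_spec : Claim_equal_policy_diff_py := by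
  intro old new _
  unfold Spec_policy_diff_py
  rw [pvAltEq, pvSortedEnts _ _ (pvNodupBuild old) (pvNodupBuild new)]
  rw [List.map_filterMap]
  have hA : policy_diff_py old new
      = (PySem.List.sorted (pvU (pvBuildMap old) (pvBuildMap new)) (fun x => x)).filterMap
          (pvOpt (pvBuildMap old) (pvBuildMap new)) := by
    unfold policy_diff_py pvU
    exact pvFoldA _ _ _ _
  rw [hA]
  apply List.filterMap_congr
  intro p _
  simp [pvOptPair, Option.map_map]
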